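-- pv_equiv track=rewrite | github.com/BionicAlligator/AoC_2023 | Day11/day11.py | extract_old_galaxies
-- ===== SOURCE A (Python) =====
-- EXPANSION_MULTIPLIER = 1000000
--
-- def extract_old_galaxies(universe):
--     galaxies = []
--
--     y = 0
--
--     for row in universe:
--         x = 0
--
--         if all(element == '$' for element in row):
--             y += EXPANSION_MULTIPLIER
--         else:
--             for sector in row:
--                 if sector == '$':
--                     x += EXPANSION_MULTIPLIER
--                 else:
--                     if sector == '#':
--                         galaxies.append((y, x))
--
--                     x += 1
--
--             y += 1
--
--     return galaxies
-- ===== SOURCE B (Python) =====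
-- EXPANSION_MULTIPLIER = 1000000
--
-- def extract_old_galaxies(universe):
--     # Closed-form coordinates from prefix counts instead of running counters:
--     # y of row i = i + (M-1) * (number of all-'$' rows before i),
--     # x of cell j = j + (M-1) * (number of '$' cells before j in its row).
--     M = EXPANSION_MULTIPLIER
--     galaxies = []
--     blanks = 0
--     for i, row in enumerate(universe):
--         if all(element == '$' for element in row):
--             blanks += 1
--         else:
--             y = (i - blanks) + M * blanks
--             for j, sector in enumerate(row):
--                 if sector == '#':
--                     galaxies.append((y, j + (M - 1) * row[:j].count('$')))
--     return galaxies
-- ===== Notes on version B (the rewrite author's own statement) =====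
-- stated objective: alternative
-- what changed: A maintains running x and y counters interleaved with the scan; B keeps no coordinate counters at all and instead computes each coordinate by a closed form from prefix counts: y = i + (M-1)*(blank rows so far) using enumerate, and x = j + (M-1)*row[:j].count('$') recomputed per galaxy.
import Mathlib
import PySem

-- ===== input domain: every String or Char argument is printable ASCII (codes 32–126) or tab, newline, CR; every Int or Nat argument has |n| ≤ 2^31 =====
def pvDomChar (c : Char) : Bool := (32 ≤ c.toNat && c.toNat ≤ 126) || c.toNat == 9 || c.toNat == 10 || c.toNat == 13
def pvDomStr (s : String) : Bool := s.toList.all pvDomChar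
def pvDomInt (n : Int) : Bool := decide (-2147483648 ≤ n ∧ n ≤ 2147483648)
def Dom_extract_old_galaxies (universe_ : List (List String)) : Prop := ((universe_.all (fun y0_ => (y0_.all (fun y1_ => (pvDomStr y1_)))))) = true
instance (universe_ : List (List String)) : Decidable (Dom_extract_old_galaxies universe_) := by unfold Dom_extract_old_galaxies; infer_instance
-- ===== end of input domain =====

-- B drops A's running x/y counters and computes each coordinate by a closed
-- form from prefix counts (blank rows before i, '$' cells before j) (objective: alternative).

-- ===== PORT A =====
def extract_old_galaxies (universe_ : List (List String)) : List (Int × Int) :=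
  (universe_.foldl (fun (st : List (Int × Int) × Int) row =>
    if row.all (fun element => element = "$") then
      (st.1, st.2 + 1000000)
    else
      let inner := row.foldl (fun (st2 : List (Int × Int) × Int) sector =>
        if sector = "$" then (st2.1, st2.2 + 1000000)
        else if sector = "#" then (st2.1 ++ [(st.2, st2.2)], st2.2 + 1)
        else (st2.1, st2.2 + 1)) (st.1, 0)
      (inner.1, st.2 + 1)) ([], 0)).1

-- ===== PORT B =====
def extract_old_galaxies_alt (universe_ : List (List String)) : List (Int × Int) :=
  ((PySem.List.enumerate universe_ 0).foldl (fun (st : List (Int × Int) × Int) p =>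
    if p.2.all (fun element => element = "$") then
      (st.1, st.2 + 1)
    else
      let y : Int := (p.1 - st.2) + 1000000 * st.2
      let gal := (PySem.List.enumerate p.2 0).foldl (fun (g : List (Int × Int)) q =>
        if q.2 = "#" then
          g ++ [(y, q.1 + (1000000 - 1) * ((PySem.List.slice p.2 none (some q.1)).count "$" : Int))]
        else g) st.1
      (gal, st.2)) ([], 0)).1

-- ===== PRECONDITION & SPEC =====
def Spec_extract_old_galaxies (universe_ : List (List String)) (out : List (Int × Int)) : Prop := out = extract_old_galaxies_alt universe_
instance (universe_ : List (List String)) (out : List (Int × Int)) : Decidable (Spec_extract_old_galaxies universe_ out) := by unfold Spec_extract_old_galaxies; infer_instance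

-- ===== CLAIM (what is proved, stated in full; the proofs are below) =====
def Claim_equal_extract_old_galaxies : Prop := ∀ (universe_ : List (List String)), Dom_extract_old_galaxies universe_ → Spec_extract_old_galaxies universe_ (extract_old_galaxies universe_)

-- ===== LEMMAS AND PROOFS =====

-- Galaxies contributed by one row, as A collects them (running x counter)
def pvCollect (y : Int) : List String → Int → List (Int × Int)
  | [], _ => []
  | s :: r, x =>
    if s = "$" then pvCollect y r (x + 1000000)
    else (if s = "#" then [(y, x)] else []) ++ pvCollect y r (x + 1)

def pvWidth (r : List String) : Int :=
  (r.map (fun s => if s = "$" then (1000000 : Int) else 1)).sum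

theorem pv_innerA (y : Int) : ∀ (row : List String) (g : List (Int × Int)) (x : Int),
    row.foldl (fun (st2 : List (Int × Int) × Int) sector =>
        if sector = "$" then (st2.1, st2.2 + 1000000)
        else if sector = "#" then (st2.1 ++ [(y, st2.2)], st2.2 + 1)
        else (st2.1, st2.2 + 1)) (g, x)
      = (g ++ pvCollect y row x, x + pvWidth row) := by
  intro row
  induction row with
  | nil => intro g x; simp [pvCollect, pvWidth]
  | cons s r ih =>
    intro g x
    simp only [List.foldl_cons]
    by_cases h1 : s = "$"
    · rw [if_pos h1, ih]
      simp only [pvCollect, pvWidth, List.map_cons, List.sum_cons, if_pos h1]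
      simp only [Prod.mk.injEq]
      exact ⟨by simp, by ring⟩
    · rw [if_neg h1]
      by_cases h2 : s = "#" <;>
        [rw [if_pos h2, ih]; rw [if_neg h2, ih]] <;>
        simp only [pvCollect, pvWidth, List.map_cons, List.sum_cons, if_neg h1] <;>
        [simp only [if_pos h2]; simp only [if_neg h2]] <;>
        (simp only [Prod.mk.injEq]; exact ⟨by simp, by ring⟩)

-- B's inner enumerate/count pass computes the same row contribution
theorem pv_innerB (y : Int) (full : List String) : ∀ (row : List String) (s : Nat)
    (_hd : full.drop s = row) (g : List (Int × Int)),
    (PySem.List.enumerate row (s : Int)).foldl (fun (g : List (Int × Int)) q =>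
        if q.2 = "#" then
          g ++ [(y, q.1 + (1000000 - 1) * ((PySem.List.slice full none (some q.1)).count "$" : Int))]
        else g) g
      = g ++ pvCollect y row ((s : Int) + (1000000 - 1) * ((full.take s).count "$" : Int)) := by
  intro row
  induction row with
  | nil => intro s hd g; simp [PySem.List.enumerate, pvCollect]
  | cons a r ih =>
    intro s hd g
    have hs : s < full.length := by
      by_contra h
      rw [List.drop_eq_nil_of_le (by omega)] at hd
      exact (List.cons_ne_nil a r) hd.symm
    have ha : full[s]? = some a := by
      have h := congrArg (fun l => l[0]?) hd
      simpa using h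
    have hd' : full.drop (s + 1) = r := by
      rw [← List.tail_drop, hd]; rfl
    have htake : full.take (s + 1) = full.take s ++ [a] := by
      rw [List.take_add_one, ha]; rfl
    have hc : ((s : Int) + 1) = ((s + 1 : Nat) : Int) := by push_cast; ring
    rw [PySem.List.enumerate_cons, List.foldl_cons, hc]
    by_cases h1 : a = "$"
    · subst h1
      have h2 : ¬ ("$" : String) = "#" := by decide
      rw [if_neg h2, ih (s + 1) hd']
      have harg : (((s + 1 : Nat)) : Int) + (1000000 - 1) * (((full.take (s + 1)).count "$" : Int))
          = ((s : Int) + (1000000 - 1) * (((full.take s).count "$") : Int)) + 1000000 := by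
        rw [htake, List.count_append]
        have : (["$"].count "$") = 1 := by decide
        rw [this]; push_cast; ring
      rw [harg]
      simp [pvCollect]
    · have hcnt : ([a].count "$") = 0 := by
        simp [h1]
      have harg : (((s + 1 : Nat)) : Int) + (1000000 - 1) * (((full.take (s + 1)).count "$" : Int))
          = ((s : Int) + (1000000 - 1) * (((full.take s).count "$") : Int)) + 1 := by
        rw [htake, List.count_append, hcnt]; push_cast; ring
      rw [PySem.List.slice_to_natCast]
      by_cases h2 : a = "#"
      · rw [if_pos h2, ih (s + 1) hd', harg]
        simp [pvCollect, h2]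
      · rw [if_neg h2, ih (s + 1) hd', harg]
        simp [pvCollect, h1, h2]

theorem pv_outer : ∀ (rows : List (List String)) (gal : List (Int × Int)) (blanks : Int) (i : Nat),
    (rows.foldl (fun (st : List (Int × Int) × Int) row =>
      if row.all (fun element => element = "$") then
        (st.1, st.2 + 1000000)
      else
        let inner := row.foldl (fun (st2 : List (Int × Int) × Int) sector =>
          if sector = "$" then (st2.1, st2.2 + 1000000)
          else if sector = "#" then (st2.1 ++ [(st.2, st2.2)], st2.2 + 1)
          else (st2.1, st2.2 + 1)) (st.1, 0)
        (inner.1, st.2 + 1)) (gal, ((i : Int) - blanks) + 1000000 * blanks)).1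
    = ((PySem.List.enumerate rows (i : Int)).foldl (fun (st : List (Int × Int) × Int) p =>
      if p.2.all (fun element => element = "$") then
        (st.1, st.2 + 1)
      else
        let y : Int := (p.1 - st.2) + 1000000 * st.2
        let gal := (PySem.List.enumerate p.2 0).foldl (fun (g : List (Int × Int)) q =>
          if q.2 = "#" then
            g ++ [(y, q.1 + (1000000 - 1) * ((PySem.List.slice p.2 none (some q.1)).count "$" : Int))]
          else g) st.1
        (gal, st.2)) (gal, blanks)).1 := by
  intro rows
  induction rows with
  | nil => intro gal blanks i; simp [PySem.List.enumerate]
  | cons row rest ih =>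
    intro gal blanks i
    rw [PySem.List.enumerate_cons]
    simp only [List.foldl_cons]
    by_cases h : (row.all (fun element => element = "$")) = true
    · rw [if_pos h, if_pos h]
      have : ((i : Int) - blanks) + 1000000 * blanks + 1000000
          = (((i + 1 : Nat) : Int) - (blanks + 1)) + 1000000 * (blanks + 1) := by push_cast; ring
      rw [this]
      exact ih gal (blanks + 1) (i + 1)
    · rw [if_neg h, if_neg h]
      rw [pv_innerA]
      have hB := pv_innerB ((((i : Int)) - blanks) + 1000000 * blanks) row row 0 (by simp) gal
      simp only [Nat.cast_zero, List.take_zero, List.count_nil, mul_zero, add_zero] at hB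
      rw [hB]
      have : ((i : Int) - blanks) + 1000000 * blanks + 1
          = (((i + 1 : Nat) : Int) - blanks) + 1000000 * blanks := by push_cast; ring
      rw [this]
      exact ih _ blanks (i + 1)

-- ===== VERDICT (by name: the statement is the Claim_ definition above) =====
theorem extract_old_galaxies_spec : Claim_equal_extract_old_galaxies := by
  intro universe_ _
  unfold Spec_extract_old_galaxies extract_old_galaxies extract_old_galaxies_alt
  have h := pv_outer universe_ [] 0 0
  have h0 : (((0 : Nat) : Int) - 0) + 1000000 * 0 = 0 := by norm_num
  rw [h0, Nat.cast_zero] at h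
  exact h
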